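-- pv_equiv track=rewrite | github.com/yyjhao/hand-tracking | smooth.py | to_points
-- ===== SOURCE A (Python) =====
-- def to_points(nums):
--     points = []
--     point = []
--     for n in nums:
--         point.append(n)
--         if len(point) == 3:
--             points.append(point)
--             point = []
--     return points
-- ===== SOURCE B (Python) =====
-- def to_points(nums):
--     it = iter(nums)
--     return [list(t) for t in zip(it, it, it)]
-- ===== Notes on version B (the rewrite author's own statement) =====
-- stated objective: idiomatic
-- what changed: Replaces the explicit accumulator-buffer loop with the standard grouper idiom: a single iterator zipped with itself three times, which pulls triples directly and drops the incomplete remainder.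
import Mathlib
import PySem

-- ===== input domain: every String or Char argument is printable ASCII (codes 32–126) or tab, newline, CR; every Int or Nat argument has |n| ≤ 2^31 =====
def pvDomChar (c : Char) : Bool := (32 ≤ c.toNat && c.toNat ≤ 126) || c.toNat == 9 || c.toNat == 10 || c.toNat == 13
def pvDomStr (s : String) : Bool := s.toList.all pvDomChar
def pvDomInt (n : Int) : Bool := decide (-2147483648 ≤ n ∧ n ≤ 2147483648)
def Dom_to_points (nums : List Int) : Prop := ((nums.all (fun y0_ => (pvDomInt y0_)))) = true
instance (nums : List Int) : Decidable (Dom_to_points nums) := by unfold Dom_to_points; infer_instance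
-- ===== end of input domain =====

-- B groups the list into triples directly (grouper idiom), instead of A's accumulator-buffer loop; same output.

-- ===== PORT A =====
-- A: fold over nums with state (points, point); append to point, flush when it has 3 elements.
def to_points (nums : List Int) : List (List Int) :=
  (nums.foldl (fun (s : List (List Int) × List Int) n =>
      let point := s.2 ++ [n]
      if point.length = 3 then (s.1 ++ [point], []) else (s.1, point))
    ([], [])).1

-- ===== PORT B =====
-- B: zip(it, it, it) pulls three elements at a time; ported as direct recursion taking triples.
def to_points_alt (nums : List Int) : List (List Int) :=
  match nums with
  | a :: b :: c :: rest => [a, b, c] :: to_points_alt rest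
  | _ => []

-- ===== PRECONDITION & SPEC =====
def Spec_to_points (nums : List Int) (out : List (List Int)) : Prop := out = to_points_alt nums
instance (nums : List Int) (out : List (List Int)) : Decidable (Spec_to_points nums out) := by unfold Spec_to_points; infer_instance

-- ===== CLAIM (what is proved, stated in full; the proofs are below) =====
def Claim_equal_to_points : Prop := ∀ (nums : List Int), Dom_to_points nums → Spec_to_points nums (to_points nums)

-- ===== LEMMAS AND PROOFS =====
theorem to_points_fold_eq (nums : List Int) (acc : List (List Int)) :
    (nums.foldl (fun (s : List (List Int) × List Int) n =>
        let point := s.2 ++ [n]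
        if point.length = 3 then (s.1 ++ [point], []) else (s.1, point))
      (acc, [])).1 = acc ++ to_points_alt nums := by
  induction nums using to_points_alt.induct generalizing acc with
  | case1 a b c rest ih =>
      have step : (List.foldl (fun (s : List (List Int) × List Int) n =>
          let point := s.2 ++ [n]
          if point.length = 3 then (s.1 ++ [point], []) else (s.1, point))
        (acc, []) (a :: b :: c :: rest)) =
        (List.foldl (fun (s : List (List Int) × List Int) n =>
          let point := s.2 ++ [n]
          if point.length = 3 then (s.1 ++ [point], []) else (s.1, point))
        (acc ++ [[a, b, c]], []) rest) := rfl
      rw [step, ih, to_points_alt]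
      simp
  | case2 nums h =>
      match nums, h with
      | [], _ => simp [to_points_alt]
      | [a], _ => simp [List.foldl, to_points_alt]
      | [a, b], _ => simp [List.foldl, to_points_alt]
      | a :: b :: c :: r, h => exact absurd rfl (h a b c r)

-- ===== VERDICT (by name: the statement is the Claim_ definition above) =====
theorem to_points_spec : Claim_equal_to_points := by
  intro nums _
  unfold Spec_to_points to_points
  simpa using to_points_fold_eq nums []
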